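-- pv_equiv track=rewrite | github.com/RezaTaheri01/my-leetcode-solutions | leetcode_1598.py | minOperationsSecond
-- ===== SOURCE A (Python) =====
-- def minOperationsSecond(logs: list[str]) -> int:
--     depth = 0
--
--     for log in logs:
--         if log == '../':
--             depth -= 1 if depth > 0 else 0
--         elif log != './':
--             depth += 1
--
--     return depth
-- ===== SOURCE B (Python) =====
-- def minOperationsSecond(logs: list[str]) -> int:
--     # Prefix-sum formulation: treat '../' as -1, './' as 0, anything else as +1,
--     # build the (unclamped) prefix sums, and use the identity
--     #   clamped-at-zero final depth = last prefix sum - min(prefix sums)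
--     pref = [0]
--     for log in logs:
--         pref.append(pref[-1] + (-1 if log == '../' else 0 if log == './' else 1))
--     return pref[-1] - min(pref)
-- ===== Notes on version B (the rewrite author's own statement) =====
-- stated objective: alternative
-- what changed: Replaces the clamped-at-zero running depth counter with unclamped prefix sums of per-log values (-1/0/+1) plus the identity final depth = last prefix sum minus the minimum prefix sum.
import Mathlib
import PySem

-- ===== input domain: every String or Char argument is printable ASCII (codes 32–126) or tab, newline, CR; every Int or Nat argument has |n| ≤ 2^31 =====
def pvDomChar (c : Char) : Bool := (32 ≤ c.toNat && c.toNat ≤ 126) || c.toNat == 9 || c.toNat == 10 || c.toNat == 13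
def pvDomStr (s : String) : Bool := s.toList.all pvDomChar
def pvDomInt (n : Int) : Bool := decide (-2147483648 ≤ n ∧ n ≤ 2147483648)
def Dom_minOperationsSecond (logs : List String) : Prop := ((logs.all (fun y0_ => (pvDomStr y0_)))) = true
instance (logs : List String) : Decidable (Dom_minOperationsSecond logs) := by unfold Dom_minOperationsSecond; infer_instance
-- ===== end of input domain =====

-- B replaces the clamped depth counter by unclamped prefix sums and the identity
-- final depth = last prefix sum - min(prefix sums)  (alternative algorithm, same cost).

-- ===== PORT A =====
-- literal port of A: fold the clamped depth counter over the logs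
def minOperationsSecond (logs : List String) : Int :=
  logs.foldl
    (fun depth log =>
      if log == "../" then depth - (if depth > 0 then 1 else 0)
      else if log != "./" then depth + 1
      else depth)
    0

-- ===== PORT B =====
-- literal port of B: build the list of prefix sums (pref[-1] via pyGetD, exact since
-- pref is never empty), then return pref[-1] - min(pref) (Python min on a nonempty list)
def minOperationsSecond_alt (logs : List String) : Int :=
  let pref := logs.foldl
    (fun pref log =>
      pref ++ [PySem.List.pyGetD pref (-1) 0 +
        (if log == "../" then (-1 : Int) else if log == "./" then 0 else 1)])
    [(0 : Int)]
  PySem.List.pyGetD pref (-1) 0 - ((PySem.List.min? pref (fun x => x)).getD 0)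

-- ===== PRECONDITION & SPEC =====
def Spec_minOperationsSecond (logs : List String) (out : Int) : Prop := out = minOperationsSecond_alt logs
instance (logs : List String) (out : Int) : Decidable (Spec_minOperationsSecond logs out) := by unfold Spec_minOperationsSecond; infer_instance

-- ===== CLAIM =====
def Claim_equal_minOperationsSecond : Prop := ∀ (logs : List String), Dom_minOperationsSecond logs → Spec_minOperationsSecond logs (minOperationsSecond logs)

-- ===== LEMMAS AND PROOFS =====

-- last element (pref[-1]) and min of the prefix list, as the ports compute them
def pvLastD (xs : List Int) : Int := PySem.List.pyGetD xs (-1) 0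
def pvMinAll (xs : List Int) : Int := ((PySem.List.min? xs (fun x => x)).getD 0)

theorem pvMinAll_cons (p : Int) (t : List Int) : pvMinAll (p :: t) = t.foldl min p := by
  simp [pvMinAll, PySem.List.min?_id_cons]

theorem pvMinAll_le_last (p : Int) (t : List Int) : pvMinAll (p :: t) ≤ pvLastD (p :: t) := by
  have h : (p :: t) ≠ [] := List.cons_ne_nil p t
  have hl : pvLastD (p :: t) = (p :: t).getLast h := by
    simp [pvLastD, PySem.List.pyGetD_neg_one]
  rw [pvMinAll_cons, hl]
  rcases List.mem_cons.mp ((p :: t).getLast_mem h) with e | e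
  · have h1 := (PySem.List.foldl_min_le t p).1
    omega
  · exact (PySem.List.foldl_min_le t p).2 _ e

theorem pvLastD_cons_append (p x : Int) (t : List Int) : pvLastD (p :: (t ++ [x])) = x := by
  have hc : p :: (t ++ [x]) = (p :: t) ++ [x] := by simp
  rw [pvLastD, hc, PySem.List.pyGetD_neg_one_append_singleton]

theorem pvMinAll_cons_append (p x : Int) (t : List Int) :
    pvMinAll (p :: (t ++ [x])) = min (pvMinAll (p :: t)) x := by
  rw [pvMinAll_cons, pvMinAll_cons, List.foldl_append]
  rfl

theorem pv_arith_down (L m : Int) (h : m ≤ L) :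
    (L - m) - (if L - m > 0 then 1 else 0) = (L + (-1)) - min m (L + (-1)) := by
  by_cases hc : L - m > 0
  · rw [if_pos hc, min_eq_left (by omega)]; ring
  · rw [if_neg hc, min_eq_right (by omega)]; omega

theorem pv_arith_keep (L m : Int) (h : m ≤ L) : L - m = (L + 0) - min m (L + 0) := by
  rw [min_eq_left (by omega)]; ring

theorem pv_arith_up (L m : Int) (h : m ≤ L) : (L - m) + 1 = (L + 1) - min m (L + 1) := by
  rw [min_eq_left (by omega)]; ring

-- main invariant: A's clamped fold from (last - min) of the prefix list equals
-- (last - min) of B's fully built prefix list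
theorem pv_inv (logs : List String) (p : Int) (t : List Int) :
    logs.foldl
      (fun depth log =>
        if log == "../" then depth - (if depth > 0 then 1 else 0)
        else if log != "./" then depth + 1
        else depth)
      (pvLastD (p :: t) - pvMinAll (p :: t))
    = pvLastD (logs.foldl
        (fun pref log =>
          pref ++ [PySem.List.pyGetD pref (-1) 0 +
            (if log == "../" then (-1 : Int) else if log == "./" then 0 else 1)])
        (p :: t))
      - pvMinAll (logs.foldl
        (fun pref log =>
          pref ++ [PySem.List.pyGetD pref (-1) 0 +
            (if log == "../" then (-1 : Int) else if log == "./" then 0 else 1)])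
        (p :: t)) := by
  induction logs generalizing t with
  | nil => rfl
  | cons l ls ih =>
    simp only [List.foldl_cons]
    have hmle := pvMinAll_le_last p t
    have hstep : ∀ w : Int,
        (p :: t) ++ [PySem.List.pyGetD (p :: t) (-1) 0 + w] = p :: (t ++ [pvLastD (p :: t) + w]) :=
      fun w => by simp [pvLastD]
    by_cases h1 : l == "../"
    · simp only [h1, reduceIte]
      rw [hstep (-1)]
      have h := ih (t ++ [pvLastD (p :: t) + (-1)])
      rw [pvLastD_cons_append, pvMinAll_cons_append] at h
      rw [pv_arith_down _ _ hmle]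
      exact h
    · have h1' : (l == "../") = false := by simpa using h1
      by_cases h2 : l == "./"
      · have h2' : (l != "./") = false := by simp [bne, h2]
        simp only [h1', h2, h2', Bool.false_eq_true, if_false, reduceIte]
        rw [hstep 0]
        have h := ih (t ++ [pvLastD (p :: t) + 0])
        rw [pvLastD_cons_append, pvMinAll_cons_append] at h
        rw [pv_arith_keep _ _ hmle]
        exact h
      · have h2'' : (l == "./") = false := by simpa using h2
        have h2' : (l != "./") = true := by simp [bne, h2'']
        simp only [h1', h2'', h2', Bool.false_eq_true, if_false, reduceIte]
        rw [hstep 1]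
        have h := ih (t ++ [pvLastD (p :: t) + 1])
        rw [pvLastD_cons_append, pvMinAll_cons_append] at h
        rw [pv_arith_up _ _ hmle]
        exact h

-- ===== VERDICT =====
theorem minOperationsSecond_spec : Claim_equal_minOperationsSecond := by
  intro logs _
  unfold Spec_minOperationsSecond minOperationsSecond minOperationsSecond_alt
  have h := pv_inv logs 0 []
  have h0 : pvLastD ([0] : List Int) - pvMinAll [0] = 0 := by decide
  rw [h0] at h
  simpa [pvLastD, pvMinAll] using h
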